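-- pv_equiv track=rewrite | github.com/yashaskl2110/lotx-detector | oauth_auditor.py | assess_scope_risk
-- ===== SOURCE A (Python) =====
-- SCOPE_RISK = {
--     # Google - Critical scopes
--     'https://www.googleapis.com/auth/gmail.readonly':        ('HIGH',     'Read all Gmail messages'),
--     'https://www.googleapis.com/auth/gmail.modify':          ('CRITICAL', 'Read, modify and delete Gmail'),
--     'https://www.googleapis.com/auth/drive':                 ('CRITICAL', 'Full Google Drive access'),
--     'https://www.googleapis.com/auth/drive.readonly':        ('HIGH',     'Read all Google Drive files'),
--     'https://www.googleapis.com/auth/calendar':              ('HIGH',     'Full calendar read/write'),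
--     'https://www.googleapis.com/auth/calendar.readonly':     ('MEDIUM',   'Read calendar events'),
--     'https://www.googleapis.com/auth/admin.directory.user':  ('CRITICAL', 'Manage all Google Workspace users'),
--     'https://www.googleapis.com/auth/spreadsheets':          ('HIGH',     'Read/write all Google Sheets'),
--     'https://www.googleapis.com/auth/contacts':              ('HIGH',     'Read/write all contacts'),
--     # GitHub
--     'repo':                                                  ('CRITICAL', 'Full repository access'),
--     'admin:org':                                             ('CRITICAL', 'Full org admin access'),
--     'delete_repo':                                           ('CRITICAL', 'Delete repositories'),
--     'write:packages':                                        ('HIGH',     'Write packages'),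
--     'read:org':                                              ('MEDIUM',   'Read org membership'),
--     'user:email':                                            ('LOW',      'Read email address'),
--     # Slack
--     'channels:history':                                      ('CRITICAL', 'Read all channel messages'),
--     'files:read':                                            ('HIGH',     'Read all files'),
--     'chat:write':                                            ('HIGH',     'Post messages'),
--     'users:read':                                            ('MEDIUM',   'Read user list'),
--     'channels:read':                                         ('LOW',      'Read channel list'),
-- }
--
-- def assess_scope_risk(scopes):
--     """
--     Assess risk level of a list of OAuth scopes.
--     Returns highest risk level and list of findings.
--     """
--     findings = []
--     highest_risk = 'LOW'
--     risk_order = {'CRITICAL': 0, 'HIGH': 1, 'MEDIUM': 2, 'LOW': 3}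
--
--     for scope in scopes:
--         if scope in SCOPE_RISK:
--             risk, description = SCOPE_RISK[scope]
--             findings.append({
--                 'scope': scope,
--                 'risk': risk,
--                 'description': description
--             })
--             if risk_order[risk] < risk_order[highest_risk]:
--                 highest_risk = risk
--
--     return highest_risk, findings
-- ===== SOURCE B (Python) =====
-- SCOPE_RISK = {
--     'https://www.googleapis.com/auth/gmail.readonly':        ('HIGH',     'Read all Gmail messages'),
--     'https://www.googleapis.com/auth/gmail.modify':          ('CRITICAL', 'Read, modify and delete Gmail'),
--     'https://www.googleapis.com/auth/drive':                 ('CRITICAL', 'Full Google Drive access'),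
--     'https://www.googleapis.com/auth/drive.readonly':        ('HIGH',     'Read all Google Drive files'),
--     'https://www.googleapis.com/auth/calendar':              ('HIGH',     'Full calendar read/write'),
--     'https://www.googleapis.com/auth/calendar.readonly':     ('MEDIUM',   'Read calendar events'),
--     'https://www.googleapis.com/auth/admin.directory.user':  ('CRITICAL', 'Manage all Google Workspace users'),
--     'https://www.googleapis.com/auth/spreadsheets':          ('HIGH',     'Read/write all Google Sheets'),
--     'https://www.googleapis.com/auth/contacts':              ('HIGH',     'Read/write all contacts'),
--     'repo':                                                  ('CRITICAL', 'Full repository access'),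
--     'admin:org':                                             ('CRITICAL', 'Full org admin access'),
--     'delete_repo':                                           ('CRITICAL', 'Delete repositories'),
--     'write:packages':                                        ('HIGH',     'Write packages'),
--     'read:org':                                              ('MEDIUM',   'Read org membership'),
--     'user:email':                                            ('LOW',      'Read email address'),
--     'channels:history':                                      ('CRITICAL', 'Read all channel messages'),
--     'files:read':                                            ('HIGH',     'Read all files'),
--     'chat:write':                                            ('HIGH',     'Post messages'),
--     'users:read':                                            ('MEDIUM',   'Read user list'),
--     'channels:read':                                         ('LOW',      'Read channel list'),
-- }
--
--
-- def assess_scope_risk(scopes):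
--     """Collect findings, then pick the highest level by a severity-ladder
--     membership test over the SET of risk levels that occur (no numeric
--     risk_order table and no running-best comparison at all)."""
--     matched = [(s,) + SCOPE_RISK[s] for s in scopes if s in SCOPE_RISK]
--     findings = [{'scope': s, 'risk': r, 'description': d} for s, r, d in matched]
--     present = {r for _, r, _ in matched}
--     highest_risk = next((lvl for lvl in ('CRITICAL', 'HIGH', 'MEDIUM')
--                          if lvl in present), 'LOW')
--     return highest_risk, findings
-- ===== Notes on version B (the rewrite author's own statement) =====
-- stated objective: alternative
-- what changed: A's fused loop with a numeric risk_order table and a running-best comparison is replaced by: collect matched findings, build the set of risk levels that occur, then walk the fixed severity ladder from critical down and return the first level present in that set, defaulting to the lowest - no numeric ordering table and no pairwise comparison at all.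
import Mathlib
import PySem

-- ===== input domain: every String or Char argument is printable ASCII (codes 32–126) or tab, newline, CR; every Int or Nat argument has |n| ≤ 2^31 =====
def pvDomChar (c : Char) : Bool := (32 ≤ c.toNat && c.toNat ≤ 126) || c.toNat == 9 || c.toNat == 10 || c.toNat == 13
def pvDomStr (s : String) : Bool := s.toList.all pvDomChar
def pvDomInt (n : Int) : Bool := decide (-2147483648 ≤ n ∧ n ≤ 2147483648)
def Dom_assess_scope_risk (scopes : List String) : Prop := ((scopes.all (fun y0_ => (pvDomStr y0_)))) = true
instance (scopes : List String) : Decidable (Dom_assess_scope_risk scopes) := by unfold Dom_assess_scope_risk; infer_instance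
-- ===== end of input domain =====

-- B replaces A's fused loop (numeric risk_order table + inline running-best) by: collect the
-- matched findings, form the SET of occurring risk levels, and take the first rung of the fixed
-- severity ladder CRITICAL/HIGH/MEDIUM present in it, defaulting to LOW (objective: alternative).

-- ===== PORT A =====
-- module-level constant SCOPE_RISK, shared by both versions
def pvScopeRisk : PySem.Dict String (String × String) := PySem.Dict.ofList [
  ("https://www.googleapis.com/auth/gmail.readonly",       ("HIGH",     "Read all Gmail messages")),
  ("https://www.googleapis.com/auth/gmail.modify",         ("CRITICAL", "Read, modify and delete Gmail")),
  ("https://www.googleapis.com/auth/drive",                ("CRITICAL", "Full Google Drive access")),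
  ("https://www.googleapis.com/auth/drive.readonly",       ("HIGH",     "Read all Google Drive files")),
  ("https://www.googleapis.com/auth/calendar",             ("HIGH",     "Full calendar read/write")),
  ("https://www.googleapis.com/auth/calendar.readonly",    ("MEDIUM",   "Read calendar events")),
  ("https://www.googleapis.com/auth/admin.directory.user", ("CRITICAL", "Manage all Google Workspace users")),
  ("https://www.googleapis.com/auth/spreadsheets",         ("HIGH",     "Read/write all Google Sheets")),
  ("https://www.googleapis.com/auth/contacts",             ("HIGH",     "Read/write all contacts")),
  ("repo",                                                 ("CRITICAL", "Full repository access")),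
  ("admin:org",                                            ("CRITICAL", "Full org admin access")),
  ("delete_repo",                                          ("CRITICAL", "Delete repositories")),
  ("write:packages",                                       ("HIGH",     "Write packages")),
  ("read:org",                                             ("MEDIUM",   "Read org membership")),
  ("user:email",                                           ("LOW",      "Read email address")),
  ("channels:history",                                     ("CRITICAL", "Read all channel messages")),
  ("files:read",                                           ("HIGH",     "Read all files")),
  ("chat:write",                                           ("HIGH",     "Post messages")),
  ("users:read",                                           ("MEDIUM",   "Read user list")),
  ("channels:read",                                        ("LOW",      "Read channel list"))]

-- risk_order = {'CRITICAL': 0, 'HIGH': 1, 'MEDIUM': 2, 'LOW': 3} (A's local table only)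
def pvRiskOrder : PySem.Dict String Int :=
  PySem.Dict.ofList [("CRITICAL", 0), ("HIGH", 1), ("MEDIUM", 2), ("LOW", 3)]

-- 'if scope in SCOPE_RISK: risk, description = SCOPE_RISK[scope]' is ported as one match on
-- get? (none exactly when the membership test fails); risk_order[risk] is getD with an
-- arbitrary default, exact because every looked-up key is a table value or the initial 'LOW'.
def assess_scope_risk (scopes : List String) : String × (List (List (String × String))) :=
  scopes.foldl (fun st scope =>
    match PySem.Dict.get? pvScopeRisk scope with
    | some (risk, description) =>
        ((if PySem.Dict.getD pvRiskOrder risk 0 < PySem.Dict.getD pvRiskOrder st.1 0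
          then risk else st.1),
         st.2 ++ [[("scope", scope), ("risk", risk), ("description", description)]])
    | none => st) ("LOW", [])

-- ===== PORT B =====
-- present is a Python set consumed only by membership tests, so PySem.Set is exact here;
-- next(... for lvl in ('CRITICAL','HIGH','MEDIUM') if lvl in present) is find? over that tuple.
def assess_scope_risk_alt (scopes : List String) : String × (List (List (String × String))) :=
  let matched := scopes.filterMap (fun s =>
    (PySem.Dict.get? pvScopeRisk s).map (fun rd => (s, rd.1, rd.2)))
  let findings := matched.map (fun t =>
    [("scope", t.1), ("risk", t.2.1), ("description", t.2.2)])
  let present : PySem.Set String := PySem.Set.ofList (matched.map (fun t => t.2.1))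
  let highest := ((["CRITICAL", "HIGH", "MEDIUM"] : List String).find?
      (fun lvl => PySem.Set.contains present lvl)).getD "LOW"
  (highest, findings)

-- ===== PRECONDITION & SPEC =====
def Spec_assess_scope_risk (scopes : List String) (out : String × (List (List (String × String)))) : Prop := out = assess_scope_risk_alt scopes
instance (scopes : List String) (out : String × (List (List (String × String)))) : Decidable (Spec_assess_scope_risk scopes out) := by unfold Spec_assess_scope_risk; infer_instance

-- ===== CLAIM (what is proved, stated in full; the proofs are below) =====
def Claim_equal_assess_scope_risk : Prop := ∀ (scopes : List String), Dom_assess_scope_risk scopes → Spec_assess_scope_risk scopes (assess_scope_risk scopes)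

-- ===== LEMMAS AND PROOFS =====

def pvOrd (r : String) : Int := PySem.Dict.getD pvRiskOrder r 0

def pvRunMin (m : String) (rs : List String) : String :=
  rs.foldl (fun a r => if pvOrd r < pvOrd a then r else a) m

def pvRisksOf (l : List String) : List String :=
  l.filterMap (fun s => (PySem.Dict.get? pvScopeRisk s).map (fun rd => rd.1))

def pvFindingsOf (l : List String) : List (List (String × String)) :=
  l.filterMap (fun s => (PySem.Dict.get? pvScopeRisk s).map (fun rd =>
    [("scope", s), ("risk", rd.1), ("description", rd.2)]))

def pvLevels : List String := ["CRITICAL", "HIGH", "MEDIUM", "LOW"]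

lemma pvFoldA (l : List String) (h : String) (fs : List (List (String × String))) :
    l.foldl (fun st scope =>
      match PySem.Dict.get? pvScopeRisk scope with
      | some (risk, description) =>
          ((if PySem.Dict.getD pvRiskOrder risk 0 < PySem.Dict.getD pvRiskOrder st.1 0
            then risk else st.1),
           st.2 ++ [[("scope", scope), ("risk", risk), ("description", description)]])
      | none => st) (h, fs)
    = (pvRunMin h (pvRisksOf l), fs ++ pvFindingsOf l) := by
  induction l generalizing h fs with
  | nil => simp [pvRunMin, pvRisksOf, pvFindingsOf]
  | cons s rest ih =>
    cases hg : PySem.Dict.get? pvScopeRisk s with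
    | none => simp [List.foldl, hg, ih, pvRunMin, pvRisksOf, pvFindingsOf]
    | some rd =>
      cases rd with
      | mk risk descr =>
        simp only [List.foldl, hg, ih, pvRisksOf, pvFindingsOf, List.filterMap_cons,
          Option.map_some, Prod.mk.injEq]
        exact ⟨rfl, by simp⟩

lemma pvRiskLevel {l : List String} {r : String} (hr : r ∈ pvRisksOf l) : r ∈ pvLevels := by
  simp only [pvRisksOf, List.mem_filterMap] at hr
  obtain ⟨s, -, hg⟩ := hr
  cases hq : PySem.Dict.get? pvScopeRisk s with
  | none => rw [hq] at hg; simp at hg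
  | some rd =>
    rw [hq] at hg
    simp only [Option.map_some, Option.some.injEq] at hg
    have hp : ∃ p ∈ pvScopeRisk.items, p.2 = rd := by
      simp only [PySem.Dict.get?, Option.map_eq_some_iff] at hq
      obtain ⟨p, hpf, hpe⟩ := hq
      exact ⟨p, List.mem_of_find?_eq_some hpf, hpe⟩
    obtain ⟨p, hpmem, hpe⟩ := hp
    have hall : pvScopeRisk.items.all (fun p => decide (p.2.1 ∈ pvLevels)) = true := by decide
    have h2 := List.all_eq_true.mp hall _ hpmem
    rw [hpe] at h2
    rw [← hg]
    simpa using h2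

-- A's running best over risk_order equals the first rung of the severity ladder present.
lemma pvLadder (rs : List String) (m : String) (hm : m ∈ pvLevels)
    (h : ∀ r ∈ rs, r ∈ pvLevels) :
    pvRunMin m rs =
      if "CRITICAL" = m ∨ "CRITICAL" ∈ rs then "CRITICAL"
      else if "HIGH" = m ∨ "HIGH" ∈ rs then "HIGH"
      else if "MEDIUM" = m ∨ "MEDIUM" ∈ rs then "MEDIUM"
      else "LOW" := by
  induction rs generalizing m with
  | nil =>
    fin_cases hm <;> simp [pvRunMin]
  | cons r rest ih =>
    have hr : r ∈ pvLevels := h r (by simp)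
    have htail : ∀ x ∈ rest, x ∈ pvLevels := fun x hx => h x (by simp [hx])
    have hstep : pvRunMin m (r :: rest) = pvRunMin (if pvOrd r < pvOrd m then r else m) rest := rfl
    have eC : pvOrd "CRITICAL" = 0 := by decide
    have eH : pvOrd "HIGH" = 1 := by decide
    have eM : pvOrd "MEDIUM" = 2 := by decide
    have eL : pvOrd "LOW" = 3 := by decide
    rw [hstep]
    fin_cases hm <;> fin_cases hr <;>
      simp only [eC, eH, eM, eL] <;> norm_num <;>
      rw [ih _ (by decide) htail] <;>
      by_cases h1 : ("CRITICAL" : String) ∈ rest <;>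
      by_cases h2 : ("HIGH" : String) ∈ rest <;>
      by_cases h3 : ("MEDIUM" : String) ∈ rest <;>
      simp [h1, h2, h3]

-- corollary at A's start value 'LOW'
lemma pvLadderLow (rs : List String) (h : ∀ r ∈ rs, r ∈ pvLevels) :
    pvRunMin "LOW" rs =
      if "CRITICAL" ∈ rs then "CRITICAL"
      else if "HIGH" ∈ rs then "HIGH"
      else if "MEDIUM" ∈ rs then "MEDIUM"
      else "LOW" := by
  rw [pvLadder rs "LOW" (by decide) h]
  by_cases h1 : ("CRITICAL" : String) ∈ rs <;>
  by_cases h2 : ("HIGH" : String) ∈ rs <;>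
  by_cases h3 : ("MEDIUM" : String) ∈ rs <;>
  simp [h1, h2, h3]

-- B's ladder scan over the set of present levels, as the same nested if
lemma pvFindLadder (rs : List String) :
    ((["CRITICAL", "HIGH", "MEDIUM"] : List String).find?
        (fun lvl => PySem.Set.contains (PySem.Set.ofList rs) lvl)).getD "LOW"
      = if "CRITICAL" ∈ rs then "CRITICAL"
        else if "HIGH" ∈ rs then "HIGH"
        else if "MEDIUM" ∈ rs then "MEDIUM"
        else "LOW" := by
  have hc : ∀ x : String, PySem.Set.contains (PySem.Set.ofList rs) x = decide (x ∈ rs) := by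
    intro x
    rw [PySem.Set.contains_eq_decide]
    simp [PySem.Set.mem_ofList]
  simp only [List.find?, hc]
  by_cases h1 : ("CRITICAL" : String) ∈ rs <;>
  by_cases h2 : ("HIGH" : String) ∈ rs <;>
  by_cases h3 : ("MEDIUM" : String) ∈ rs <;>
  simp [h1, h2, h3]

-- ===== VERDICT (by name: the statement is the Claim_ definition above) =====
theorem assess_scope_risk_spec : Claim_equal_assess_scope_risk := by
  intro scopes _
  unfold Spec_assess_scope_risk assess_scope_risk assess_scope_risk_alt
  rw [pvFoldA]
  have hrisks : (scopes.filterMap (fun s =>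
      (PySem.Dict.get? pvScopeRisk s).map (fun rd => (s, rd.1, rd.2)))).map (fun t => t.2.1)
      = pvRisksOf scopes := by
    simp [pvRisksOf, List.map_filterMap, Option.map_map, Function.comp_def]
  have hfind : (scopes.filterMap (fun s =>
      (PySem.Dict.get? pvScopeRisk s).map (fun rd => (s, rd.1, rd.2)))).map (fun t =>
      [("scope", t.1), ("risk", t.2.1), ("description", t.2.2)])
      = pvFindingsOf scopes := by
    simp [pvFindingsOf, List.map_filterMap, Option.map_map, Function.comp_def]
  simp only [hrisks, hfind, List.nil_append, Prod.mk.injEq]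
  refine ⟨?_, trivial⟩
  rw [pvFindLadder, pvLadderLow (pvRisksOf scopes) (fun r hr => pvRiskLevel hr)]
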